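-- pv_equiv track=rewrite | github.com/DoubleJONY/KDJ-algorithm-challenge | minsoo/graph/num_of_room_delete_redundant.py | solution
-- ===== SOURCE A (Python) =====
-- from collections import defaultdict
--
-- def solution(arrows):
--     dx = [-1, -1, 0, 1, 1, 1, 0, -1]
--     dy = [0, 1, 1, 1, 0, -1, -1, -1]
--
--     visited = defaultdict(lambda: False)
--     visited_from = defaultdict(set)
--
--     prev = (0, 0)
--     visited[prev] = True
--
--     cnt = 0
--     for d in arrows:
--         for _ in range(2):
--             x, y = prev
--             curr = (x + dx[d], y + dy[d])
--
--             if visited[curr]: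
--                 if prev not in visited_from[curr]:
--                     cnt += 1
--             else:
--                 visited[curr] = True
--
--             visited_from[curr].add(prev)
--             visited_from[prev].add(curr)
--
--             prev = curr
--
--     return cnt
-- ===== SOURCE B (Python) =====
-- def solution(arrows):
--     dx = [-1, -1, 0, 1, 1, 1, 0, -1]
--     dy = [0, 1, 1, 1, 0, -1, -1, -1]
--
--     prev = (0, 0)
--     vertices = {prev}
--     edges = set()
--
--     for d in arrows:
--         for _ in range(2):
--             x, y = prev
--             curr = (x + dx[d], y + dy[d])
--             edge = (min(prev, curr), max(prev, curr))
--             edges.add(edge)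
--             vertices.add(curr)
--             prev = curr
--
--     # Euler's formula for a connected planar walk: bounded faces = E - V + 1
--     return len(edges) - len(vertices) + 1
-- ===== Notes on version B (the rewrite author's own statement) =====
-- stated objective: simpler
-- what changed: Replaces the incremental cycle-detection (visited map + visited_from adjacency sets with a per-step 'new edge into a visited vertex' test) by accumulating only the set of visited vertices and the set of undirected edges and returning len(edges) - len(vertices) + 1 (Euler's formula for a connected walk).
import Mathlib
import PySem

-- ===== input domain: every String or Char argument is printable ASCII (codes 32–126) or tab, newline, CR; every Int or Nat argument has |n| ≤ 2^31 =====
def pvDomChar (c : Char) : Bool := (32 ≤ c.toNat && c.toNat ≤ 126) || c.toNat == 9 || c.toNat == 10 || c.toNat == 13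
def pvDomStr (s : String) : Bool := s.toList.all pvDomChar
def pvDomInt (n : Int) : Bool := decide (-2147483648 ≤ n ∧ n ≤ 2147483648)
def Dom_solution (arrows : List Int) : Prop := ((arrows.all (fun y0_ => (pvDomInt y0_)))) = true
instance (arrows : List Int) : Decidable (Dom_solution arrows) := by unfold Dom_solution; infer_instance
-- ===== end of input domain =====

-- B replaces A's incremental cycle counting (visited map + visited_from adjacency, counting
-- new edges into already-visited vertices) by collecting the vertex set and the undirected
-- edge set of the walk and returning len(edges) - len(vertices) + 1 (Euler's formula).

-- ===== PORT A =====
-- dx/dy tables of A (shared literal constants of the Python source)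
def pvDx : List Int := [-1, -1, 0, 1, 1, 1, 0, -1]
def pvDy : List Int := [0, 1, 1, 1, 0, -1, -1, -1]

-- A's loop state: visited (defaultdict(bool)), visited_from (defaultdict(set)), prev, cnt
structure AState where
  visited : PySem.Dict (Int × Int) Bool
  vf : PySem.Dict (Int × Int) (PySem.Set (Int × Int))
  prev : Int × Int
  cnt : Int

-- one inner iteration ('for _ in range(2)') of A; none = IndexError on dx[d]/dy[d]
def stepA (s : AState) (d : Int) : Option AState :=
  match PySem.List.pyGet? pvDx d, PySem.List.pyGet? pvDy d with
  | some ddx, some ddy =>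
    let curr : Int × Int := (s.prev.1 + ddx, s.prev.2 + ddy)
    let cnt' : Int :=
      if s.visited.getD curr false then
        (if (PySem.Set.contains (s.vf.getD curr PySem.Set.empty) s.prev) then s.cnt else s.cnt + 1)
      else s.cnt
    let visited' := if s.visited.getD curr false then s.visited else s.visited.insert curr true
    let vf1 := s.vf.insert curr (PySem.Set.add (s.vf.getD curr PySem.Set.empty) s.prev)
    let vf2 := vf1.insert s.prev (PySem.Set.add (vf1.getD s.prev PySem.Set.empty) curr)
    some ⟨visited', vf2, curr, cnt'⟩
  | _, _ => none

def solution (arrows : List Int) : Int :=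
  match arrows.foldl (fun os d => os.bind (fun s => (stepA s d).bind (fun s' => stepA s' d)))
      (some ⟨(PySem.Dict.empty.insert (0, 0) true), PySem.Dict.empty, (0, 0), 0⟩) with
  | some s => s.cnt
  | none => 0   -- unreachable under Pre_solution (Python raises IndexError there)

-- ===== PORT B =====
-- Python tuple comparison '<' (lexicographic), used by min/max on the two endpoints
def pvLt (a b : Int × Int) : Bool := a.1 < b.1 || (a.1 == b.1 && a.2 < b.2)

-- B's loop state: vertex set, undirected-edge set (as (min,max) endpoint pairs), prev
structure BState where
  vertices : PySem.Set (Int × Int)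
  edges : PySem.Set ((Int × Int) × (Int × Int))
  prev : Int × Int

-- one inner iteration of B; none = IndexError on dx[d]/dy[d]
def stepB (s : BState) (d : Int) : Option BState :=
  match PySem.List.pyGet? pvDx d, PySem.List.pyGet? pvDy d with
  | some ddx, some ddy =>
    let curr : Int × Int := (s.prev.1 + ddx, s.prev.2 + ddy)
    let e : (Int × Int) × (Int × Int) := if pvLt curr s.prev then (curr, s.prev) else (s.prev, curr)
    some ⟨PySem.Set.add s.vertices curr, PySem.Set.add s.edges e, curr⟩
  | _, _ => none

def solution_alt (arrows : List Int) : Int :=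
  match arrows.foldl (fun os d => os.bind (fun s => (stepB s d).bind (fun s' => stepB s' d)))
      (some ⟨PySem.Set.add PySem.Set.empty (0, 0), PySem.Set.empty, (0, 0)⟩) with
  | some s => (s.edges.length : Int) - (s.vertices.length : Int) + 1
  | none => 0   -- unreachable under Pre_solution (Python raises IndexError there)

-- ===== PRECONDITION & SPEC =====
-- Pre_ excludes exactly the arrows outside [-8, 8), on which A's dx[d] raises IndexError.
def Pre_solution (arrows : List Int) : Prop := ∀ d ∈ arrows, -8 ≤ d ∧ d < 8
instance (arrows : List Int) : Decidable (Pre_solution arrows) := by unfold Pre_solution; infer_instance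
def pvWitness_solution : List Int := [0, 2, 4, 6, 1, 5]

def Spec_solution (arrows : List Int) (out : Int) : Prop := out = solution_alt arrows
instance (arrows : List Int) (out : Int) : Decidable (Spec_solution arrows out) := by unfold Spec_solution; infer_instance

-- ===== CLAIM (what is proved, stated in full; the proofs are below) =====
def Claim_equal_solution : Prop := ∀ (arrows : List Int), Dom_solution arrows → Pre_solution arrows → Spec_solution arrows (solution arrows)

-- ===== LEMMAS AND PROOFS =====

-- the normalised undirected edge {u, v}
def pvNorm (u v : Int × Int) : (Int × Int) × (Int × Int) := if pvLt v u then (v, u) else (u, v)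

lemma pvNorm_comm (u v : Int × Int) : pvNorm u v = pvNorm v u := by
  rcases u with ⟨u1, u2⟩; rcases v with ⟨v1, v2⟩
  simp only [pvNorm, pvLt]
  split_ifs with h1 h2 h2 <;> simp_all <;> omega

lemma pvNorm_eq_cases (u v p c : Int × Int) (h : pvNorm u v = pvNorm p c) :
    (u = p ∧ v = c) ∨ (u = c ∧ v = p) := by
  unfold pvNorm at h
  split_ifs at h <;> (injection h with h1 h2; subst h1; subst h2; tauto)

-- the simulation invariant between A's and B's loop states
def SimInv (a : AState) (b : BState) : Prop :=
  a.prev = b.prev ∧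
  b.prev ∈ b.vertices ∧
  (∀ v, a.visited.getD v false = true ↔ v ∈ b.vertices) ∧
  (∀ u v, u ∈ a.vf.getD v PySem.Set.empty ↔ pvNorm u v ∈ b.edges) ∧
  (∀ u v, u ∈ a.vf.getD v PySem.Set.empty → v ∈ b.vertices) ∧
  a.cnt = (b.edges.length : Int) - (b.vertices.length : Int) + 1

-- membership of a normalised edge in an edge set extended by pvNorm p c
lemma mem_norm_add (E : PySem.Set ((Int × Int) × (Int × Int))) (u v p c : Int × Int) :
    pvNorm u v ∈ PySem.Set.add E (pvNorm p c) ↔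
      pvNorm u v ∈ E ∨ (u = p ∧ v = c) ∨ (u = c ∧ v = p) := by
  rw [PySem.Set.mem_add]
  constructor
  · rintro (h | h)
    · exact Or.inl h
    · exact Or.inr (pvNorm_eq_cases u v p c h)
  · rintro (h | ⟨rfl, rfl⟩ | ⟨rfl, rfl⟩)
    · exact Or.inl h
    · exact Or.inr rfl
    · exact Or.inr (pvNorm_comm u v)

-- one inner iteration preserves the invariant (p = common prev, c = common curr)
lemma step_core (vis : PySem.Dict (Int × Int) Bool)
    (vf : PySem.Dict (Int × Int) (PySem.Set (Int × Int)))
    (p : Int × Int) (cnt : Int)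
    (V : PySem.Set (Int × Int)) (E : PySem.Set ((Int × Int) × (Int × Int)))
    (c : Int × Int)
    (hmem : p ∈ V)
    (hvis : ∀ v, vis.getD v false = true ↔ v ∈ V)
    (hedge : ∀ u v, u ∈ vf.getD v PySem.Set.empty ↔ pvNorm u v ∈ E)
    (hend : ∀ u v, u ∈ vf.getD v PySem.Set.empty → v ∈ V)
    (hcnt : cnt = (E.length : Int) - (V.length : Int) + 1) :
    SimInv
      ⟨(if vis.getD c false then vis else vis.insert c true),
       ((vf.insert c (PySem.Set.add (vf.getD c PySem.Set.empty) p)).insert p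
         (PySem.Set.add ((vf.insert c (PySem.Set.add (vf.getD c PySem.Set.empty) p)).getD p PySem.Set.empty) c)),
       c,
       (if vis.getD c false then
          (if PySem.Set.contains (vf.getD c PySem.Set.empty) p then cnt else cnt + 1)
        else cnt)⟩
      ⟨PySem.Set.add V c,
       PySem.Set.add E (if pvLt c p then (c, p) else (p, c)),
       c⟩ := by
  have hE : (if pvLt c p then (c, p) else (p, c)) = pvNorm p c := by
    simp [pvNorm]
  have hvf2 : ∀ v, ((vf.insert c (PySem.Set.add (vf.getD c PySem.Set.empty) p)).insert p
        (PySem.Set.add ((vf.insert c (PySem.Set.add (vf.getD c PySem.Set.empty) p)).getD p PySem.Set.empty) c)).getD v PySem.Set.empty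
      = if v = p then PySem.Set.add (if p = c then PySem.Set.add (vf.getD c PySem.Set.empty) p else vf.getD p PySem.Set.empty) c
        else if v = c then PySem.Set.add (vf.getD c PySem.Set.empty) p
        else vf.getD v PySem.Set.empty := by
    intro v
    simp only [PySem.Dict.getD_insert]
  refine ⟨rfl, ?_, ?_, ?_, ?_, ?_⟩
  · -- prev' = c ∈ vertices'
    dsimp only
    rw [PySem.Set.mem_add]
    exact Or.inr rfl
  · -- visited ↔ vertices
    intro v
    dsimp only
    rw [PySem.Set.mem_add]
    by_cases hv : vis.getD c false = true
    · rw [if_pos hv, hvis v]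
      constructor
      · exact Or.inl
      · rintro (hvm | rfl)
        · exact hvm
        · exact (hvis _).mp hv
    · rw [if_neg hv, PySem.Dict.getD_insert]
      by_cases hvc : v = c
      · rw [if_pos hvc]
        simp [hvc]
      · rw [if_neg hvc, hvis v]
        constructor
        · exact Or.inl
        · rintro (hvm | rfl)
          · exact hvm
          · exact absurd rfl hvc
  · -- edges iff
    intro u v
    dsimp only
    rw [hvf2 v, hE, mem_norm_add]
    by_cases hvp : v = p
    · rw [if_pos hvp, hvp]
      by_cases hpc : p = c
      · rw [if_pos hpc]
        simp only [PySem.Set.mem_add, hedge, hpc]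
        tauto
      · rw [if_neg hpc]
        simp only [PySem.Set.mem_add, hedge]
        constructor
        · rintro (h | rfl)
          · exact Or.inl h
          · exact Or.inr (Or.inr ⟨rfl, trivial⟩)
        · rintro (h | ⟨rfl, h⟩ | ⟨rfl, _⟩)
          · exact Or.inl h
          · exact absurd h hpc
          · exact Or.inr rfl
    · rw [if_neg hvp]
      by_cases hvc : v = c
      · rw [if_pos hvc, hvc]
        have hcp : ¬c = p := fun h => hvp (hvc.trans h)
        simp only [PySem.Set.mem_add, hedge]
        constructor
        · rintro (h | rfl)
          · exact Or.inl h
          · exact Or.inr (Or.inl ⟨rfl, trivial⟩)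
        · rintro (h | ⟨rfl, _⟩ | ⟨rfl, h⟩)
          · exact Or.inl h
          · exact Or.inr rfl
          · exact absurd h hcp
      · rw [if_neg hvc, hedge u v]
        constructor
        · exact Or.inl
        · rintro (h | ⟨_, h⟩ | ⟨_, h⟩)
          · exact h
          · exact absurd h hvc
          · exact absurd h hvp
  · -- endpoints of vf entries are visited vertices
    intro u v
    dsimp only
    rw [hvf2 v, PySem.Set.mem_add]
    by_cases hvp : v = p
    · rw [if_pos hvp]
      intro _
      exact Or.inl (hvp ▸ hmem)
    · rw [if_neg hvp]
      by_cases hvc : v = c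
      · rw [if_pos hvc]
        intro _
        exact Or.inr hvc
      · rw [if_neg hvc]
        intro hu
        exact Or.inl (hend u v hu)
  · -- the counting identity
    dsimp only
    by_cases hv : vis.getD c false = true
    · have hcv : c ∈ V := (hvis c).mp hv
      rw [if_pos hv, PySem.Set.add_of_mem hcv, hE]
      by_cases hcf : PySem.Set.contains (vf.getD c PySem.Set.empty) p = true
      · have hpc : pvNorm p c ∈ E :=
          (hedge p c).mp ((PySem.Set.contains_iff _ _).mp hcf)
        rw [PySem.Set.add_of_mem hpc, if_pos hcf]
        exact hcnt
      · have hpc : pvNorm p c ∉ E := by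
          intro hmm
          exact hcf ((PySem.Set.contains_iff _ _).mpr ((hedge p c).mpr hmm))
        rw [PySem.Set.add_of_not_mem hpc, if_neg hcf]
        simp only [List.length_append, List.length_singleton]
        push_cast
        omega
    · have hcv : c ∉ V := fun hmm => hv ((hvis c).mpr hmm)
      have hpc : pvNorm p c ∉ E := by
        intro hmm
        exact hcv (hend p c ((hedge p c).mpr hmm))
      rw [if_neg hv, hE, PySem.Set.add_of_not_mem hpc, PySem.Set.add_of_not_mem hcv]
      simp only [List.length_append, List.length_singleton]
      push_cast
      omega

lemma step_pair (d : Int) (a : AState) (b : BState) (h : SimInv a b) :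
    (stepA a d = none ∧ stepB b d = none) ∨
    (∃ a' b', stepA a d = some a' ∧ stepB b d = some b' ∧ SimInv a' b') := by
  obtain ⟨hprev, hmem, hvis, hedge, hend, hcnt⟩ := h
  unfold stepA stepB
  cases h1 : PySem.List.pyGet? pvDx d with
  | none => left; constructor <;> rfl
  | some ddx =>
    cases h2 : PySem.List.pyGet? pvDy d with
    | none => left; constructor <;> rfl
    | some ddy =>
      right
      rw [hprev]
      exact ⟨_, _, rfl, rfl,
        step_core a.visited a.vf b.prev a.cnt b.vertices b.edges (b.prev.1 + ddx, b.prev.2 + ddy)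
          hmem hvis hedge hend hcnt⟩

-- the invariant on the Option level, carried through the whole fold
def OInv (oa : Option AState) (ob : Option BState) : Prop :=
  (oa = none ∧ ob = none) ∨ ∃ a b, oa = some a ∧ ob = some b ∧ SimInv a b

lemma loop_pair (arrows : List Int) (oa : Option AState) (ob : Option BState) (h : OInv oa ob) :
    OInv (arrows.foldl (fun os d => os.bind (fun s => (stepA s d).bind (fun s' => stepA s' d))) oa)
         (arrows.foldl (fun os d => os.bind (fun s => (stepB s d).bind (fun s' => stepB s' d))) ob) := by
  induction arrows generalizing oa ob with
  | nil => exact h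
  | cons d rest ih =>
    simp only [List.foldl_cons]
    apply ih
    rcases h with ⟨rfl, rfl⟩ | ⟨a, b, rfl, rfl, hinv⟩
    · exact Or.inl ⟨rfl, rfl⟩
    · simp only [Option.bind_some]
      rcases step_pair d a b hinv with ⟨ha1, hb1⟩ | ⟨a1, b1, ha1, hb1, hinv1⟩
      · rw [ha1, hb1]; exact Or.inl ⟨rfl, rfl⟩
      · rw [ha1, hb1]
        simp only [Option.bind_some]
        rcases step_pair d a1 b1 hinv1 with ⟨ha2, hb2⟩ | ⟨a2, b2, ha2, hb2, hinv2⟩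
        · rw [ha2, hb2]; exact Or.inl ⟨rfl, rfl⟩
        · rw [ha2, hb2]; exact Or.inr ⟨a2, b2, rfl, rfl, hinv2⟩

lemma init_inv : SimInv ⟨(PySem.Dict.empty.insert (0, 0) true), PySem.Dict.empty, (0, 0), 0⟩
    ⟨PySem.Set.add PySem.Set.empty (0, 0), PySem.Set.empty, (0, 0)⟩ := by
  refine ⟨rfl, by decide, ?_, ?_, ?_, by decide⟩
  · intro v
    rw [PySem.Dict.getD_insert]
    split_ifs with hv
    · subst hv; simp [PySem.Set.add, PySem.Set.empty]
    · simp only [PySem.Dict.getD_empty]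
      constructor
      · intro hh; exact absurd hh (by decide)
      · intro hh
        exfalso
        apply hv
        simpa [PySem.Set.add, PySem.Set.empty, PySem.Set.contains] using hh
  · intro u v
    simp [PySem.Dict.getD_empty, PySem.Set.empty]
  · intro u v
    simp [PySem.Dict.getD_empty, PySem.Set.empty]

-- ===== VERDICT (by name: the statement is the Claim_ definition above) =====
theorem solution_spec : Claim_equal_solution := by
  intro arrows _ _
  unfold Spec_solution solution solution_alt
  have h := loop_pair arrows
      (some ⟨(PySem.Dict.empty.insert (0, 0) true), PySem.Dict.empty, (0, 0), 0⟩)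
      (some ⟨PySem.Set.add PySem.Set.empty (0, 0), PySem.Set.empty, (0, 0)⟩)
      (Or.inr ⟨_, _, rfl, rfl, init_inv⟩)
  rcases h with ⟨ha, hb⟩ | ⟨a, b, ha, hb, hinv⟩
  · rw [ha, hb]
  · rw [ha, hb]
    exact hinv.2.2.2.2.2
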